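-- pv_equiv track=rewrite | github.com/kains675/UPDD | utils/rank_results_qmmm.py | fuzzy_match_all
-- ===== SOURCE A (Python) =====
-- def fuzzy_match_all(name, candidates):
--     """[#29 v0.2] 설계 이름에 매칭되는 **모든** 스냅샷을 리스트로 반환.
--
--     fuzzy_match 는 첫 매치 1개만 반환하므로 디자인당 스냅샷 E_int 평균 랭킹을
--     위해 다중 매칭 버전을 추가했다. 매칭 규칙은 fuzzy_match 와 동일:
--         - 정확히 이름이 일치하거나
--         - "{name}_snap" 으로 시작하거나
--         - "_snap" 이전 prefix 가 서로 startswith 관계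
--     """
--     matches = []
--     # 정확 일치
--     if name in candidates:
--         matches.append(name)
--     # _snap 접두 일치
--     for cand in candidates:
--         if cand == name:
--             continue
--         if cand.startswith(name + "_snap"):
--             if cand not in matches:
--                 matches.append(cand)
--     # prefix 양방향 매칭
--     for cand in candidates:
--         if cand in matches or cand == name:
--             continue
--         if "_snap" in cand:
--             cand_prefix = cand.split("_snap")[0]
--             if cand_prefix.startswith(name) or name.startswith(cand_prefix):
--                 matches.append(cand)
--     return matches
-- ===== SOURCE B (Python) =====
-- def fuzzy_match_all(name, candidates):
--     """Single classifying pass over candidates (with a seen-set) instead of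
--     a membership scan plus two more passes; same output, category order kept."""
--     exact = [name] if name in candidates else []
--     tag = name + "_snap"
--     seen = set()
--     snaps = []
--     prefs = []
--     for cand in candidates:
--         if cand == name or cand in seen:
--             continue
--         seen.add(cand)
--         if cand.startswith(tag):
--             snaps.append(cand)
--         elif "_snap" in cand:
--             p = cand.split("_snap")[0]
--             if p.startswith(name) or name.startswith(p):
--                 prefs.append(cand)
--     return exact + snaps + prefs
-- ===== Notes on version B (the rewrite author's own statement) =====
-- stated objective: faster
-- what changed: Replaces A's three scans over candidates (exact membership test, _snap-prefix pass, bidirectional-prefix pass, each deduplicating by scanning the growing result list) with one classifying pass that maintains a seen-set and three ordered buckets, returned concatenated.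
import Mathlib
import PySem

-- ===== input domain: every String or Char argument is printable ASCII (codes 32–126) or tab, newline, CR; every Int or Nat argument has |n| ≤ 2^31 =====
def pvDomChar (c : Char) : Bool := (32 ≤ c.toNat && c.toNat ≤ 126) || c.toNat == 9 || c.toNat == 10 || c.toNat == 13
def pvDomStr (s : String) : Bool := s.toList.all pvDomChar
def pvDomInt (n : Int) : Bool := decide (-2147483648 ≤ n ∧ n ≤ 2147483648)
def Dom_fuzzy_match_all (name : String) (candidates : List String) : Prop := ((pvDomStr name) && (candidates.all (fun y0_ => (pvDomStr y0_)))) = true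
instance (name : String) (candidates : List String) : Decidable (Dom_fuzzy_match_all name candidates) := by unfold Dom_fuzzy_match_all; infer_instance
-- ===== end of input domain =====

-- B replaces A's three scans (exact test, _snap pass, prefix pass, each deduplicating
-- against the growing result) with one classifying pass keeping a seen-set and three buckets.


-- ===== PORT A =====
-- the bidirectional prefix test on the part of cand before "_snap"
-- (cand.split("_snap")[0]: splitOn never returns [], so headD "" is exact)
def pvPrefCond (name cand : String) : Bool :=
  -- cand.split("_snap")[0]: sep ≠ "" so split? is some, and the list is never empty
  let p := ((PySem.Str.split? cand "_snap").getD []).headD ""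
  PySem.Str.startswith p name || PySem.Str.startswith name p

def fuzzy_match_all (name : String) (candidates : List String) : List String :=
  -- exact match
  let matches0 : List String := if candidates.contains name then [name] else []
  -- "_snap"-prefixed pass
  let matches1 : List String := candidates.foldl (fun m cand =>
    if cand == name then m
    else if PySem.Str.startswith cand (name ++ "_snap") then
      (if m.contains cand then m else m ++ [cand])
    else m) matches0
  -- bidirectional prefix pass
  candidates.foldl (fun m cand =>
    if m.contains cand || cand == name then m
    else if PySem.Str.isIn "_snap" cand then
      (if pvPrefCond name cand then m ++ [cand] else m)
    else m) matches1

-- ===== PORT B =====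
def fuzzy_match_all_alt (name : String) (candidates : List String) : List String :=
  let exact : List String := if candidates.contains name then [name] else []
  let tag := name ++ "_snap"
  let st := candidates.foldl
    (fun (st : PySem.Set String × List String × List String) cand =>
      let (seen, snaps, prefs) := st
      if cand == name || PySem.Set.contains seen cand then (seen, snaps, prefs)
      else
        let seen := PySem.Set.add seen cand
        if PySem.Str.startswith cand tag then (seen, snaps ++ [cand], prefs)
        else if PySem.Str.isIn "_snap" cand then
          (if pvPrefCond name cand then (seen, snaps, prefs ++ [cand])
           else (seen, snaps, prefs))
        else (seen, snaps, prefs))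
    (PySem.Set.empty, [], [])
  exact ++ st.2.1 ++ st.2.2

-- ===== PRECONDITION & SPEC =====
def Spec_fuzzy_match_all (name : String) (candidates : List String) (out : List String) : Prop := out = fuzzy_match_all_alt name candidates
instance (name : String) (candidates : List String) (out : List String) : Decidable (Spec_fuzzy_match_all name candidates out) := by unfold Spec_fuzzy_match_all; infer_instance

-- ===== CLAIM (what is proved, stated in full; the proofs are below) =====
def Claim_equal_fuzzy_match_all : Prop := ∀ (name : String) (candidates : List String), Dom_fuzzy_match_all name candidates → Spec_fuzzy_match_all name candidates (fuzzy_match_all name candidates)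

-- ===== LEMMAS AND PROOFS =====

-- dedup-filter with an explicit seen list: the common normal form of A's two passes
def dfilter (P : String → Bool) : List String → List String → List String
  | _, [] => []
  | seen, c :: cs =>
      if P c && !seen.contains c then c :: dfilter P (seen ++ [c]) cs
      else dfilter P seen cs

-- one bucket of B's single pass (seen grows on every visited non-name cand)
def gbuck (P : String → Bool) (name : String) : List String → List String → List String
  | _, [] => []
  | seen, c :: cs =>
      if c == name || seen.contains c then gbuck P name seen cs
      else if P c then c :: gbuck P name (seen ++ [c]) cs
      else gbuck P name (seen ++ [c]) cs

-- the loop bodies, named so rewriting never touches a lambda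
def stepA1 (name : String) (sw : String → Bool) (m : List String) (cand : String) : List String :=
  if cand == name then m
  else if sw cand then (if m.contains cand then m else m ++ [cand])
  else m

def stepA2 (name : String) (q r : String → Bool) (m : List String) (cand : String) : List String :=
  if m.contains cand || cand == name then m
  else if q cand then (if r cand then m ++ [cand] else m)
  else m

def stepB (name : String) (sw q r : String → Bool)
    (st : PySem.Set String × List String × List String) (cand : String) :
    PySem.Set String × List String × List String :=
  let (seen, snaps, prefs) := st
  if cand == name || PySem.Set.contains seen cand then (seen, snaps, prefs)
  else
    let seen := PySem.Set.add seen cand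
    if sw cand then (seen, snaps ++ [cand], prefs)
    else if q cand then
      (if r cand then (seen, snaps, prefs ++ [cand]) else (seen, snaps, prefs))
    else (seen, snaps, prefs)

-- A's first loop in dfilter normal form (sw abstracts the startswith test)
lemma loopA1_eq (name : String) (sw : String → Bool) : ∀ (cs m : List String),
    cs.foldl (stepA1 name sw) m
    = m ++ dfilter (fun c => !(c == name) && sw c) m cs := by
  intro cs
  induction cs with
  | nil => intro m; simp [dfilter]
  | cons c cs ih =>
    intro m
    rw [List.foldl_cons]
    by_cases h1 : c = name
    · have e : stepA1 name sw m c = m := by simp [stepA1, h1]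
      have e2 : dfilter (fun c => !(c == name) && sw c) m (c :: cs)
          = dfilter (fun c => !(c == name) && sw c) m cs := by
        simp only [dfilter]; rw [if_neg]; simp [h1]
      rw [e, e2]; exact ih m
    · by_cases h2 : sw c = true
      · by_cases h3 : c ∈ m
        · have e : stepA1 name sw m c = m := by simp [stepA1, h1, h2, h3]
          have e2 : dfilter (fun c => !(c == name) && sw c) m (c :: cs)
              = dfilter (fun c => !(c == name) && sw c) m cs := by
            simp only [dfilter]; rw [if_neg]; simp [h3]
          rw [e, e2]; exact ih m
        · have e : stepA1 name sw m c = m ++ [c] := by simp [stepA1, h1, h2, h3]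
          have e2 : dfilter (fun c => !(c == name) && sw c) m (c :: cs)
              = c :: dfilter (fun c => !(c == name) && sw c) (m ++ [c]) cs := by
            simp only [dfilter]; rw [if_pos]; simp [h1, h2, h3]
          rw [e, e2, ih (m ++ [c])]
          simp
      · have e : stepA1 name sw m c = m := by simp [stepA1, h1, h2]
        have e2 : dfilter (fun c => !(c == name) && sw c) m (c :: cs)
            = dfilter (fun c => !(c == name) && sw c) m cs := by
          simp only [dfilter]; rw [if_neg]; simp [h2]
        rw [e, e2]; exact ih m

-- A's second loop in dfilter normal form (q: the "_snap" test, r: the prefix test)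
lemma loopA2_eq (name : String) (q r : String → Bool) : ∀ (cs m : List String),
    cs.foldl (stepA2 name q r) m
    = m ++ dfilter (fun c => !(c == name) && (q c && r c)) m cs := by
  intro cs
  induction cs with
  | nil => intro m; simp [dfilter]
  | cons c cs ih =>
    intro m
    rw [List.foldl_cons]
    by_cases h0 : c ∈ m
    · have e : stepA2 name q r m c = m := by simp [stepA2, h0]
      have e2 : dfilter (fun c => !(c == name) && (q c && r c)) m (c :: cs)
          = dfilter (fun c => !(c == name) && (q c && r c)) m cs := by
        simp only [dfilter]; rw [if_neg]; simp [h0]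
      rw [e, e2]; exact ih m
    · by_cases h1 : c = name
      · have e : stepA2 name q r m c = m := by simp [stepA2, h1]
        have e2 : dfilter (fun c => !(c == name) && (q c && r c)) m (c :: cs)
            = dfilter (fun c => !(c == name) && (q c && r c)) m cs := by
          simp only [dfilter]; rw [if_neg]; simp [h1]
        rw [e, e2]; exact ih m
      · by_cases h2 : q c = true
        · by_cases h3 : r c = true
          · have e : stepA2 name q r m c = m ++ [c] := by simp [stepA2, h0, h1, h2, h3]
            have e2 : dfilter (fun c => !(c == name) && (q c && r c)) m (c :: cs)
                = c :: dfilter (fun c => !(c == name) && (q c && r c)) (m ++ [c]) cs := by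
              simp only [dfilter]; rw [if_pos]; simp [h0, h1, h2, h3]
            rw [e, e2, ih (m ++ [c])]
            simp
          · have e : stepA2 name q r m c = m := by simp [stepA2, h0, h1, h2, h3]
            have e2 : dfilter (fun c => !(c == name) && (q c && r c)) m (c :: cs)
                = dfilter (fun c => !(c == name) && (q c && r c)) m cs := by
              simp only [dfilter]; rw [if_neg]; simp [h3]
            rw [e, e2]; exact ih m
        · have e : stepA2 name q r m c = m := by simp [stepA2, h0, h1, h2]
          have e2 : dfilter (fun c => !(c == name) && (q c && r c)) m (c :: cs)
              = dfilter (fun c => !(c == name) && (q c && r c)) m cs := by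
            simp only [dfilter]; rw [if_neg]; simp [h2]
          rw [e, e2]; exact ih m

-- B's single loop splits into two gbuck buckets
lemma loopB_eq (name : String) (sw q r : String → Bool) :
    ∀ (cs seen snaps prefs : List String),
    cs.foldl (stepB name sw q r) (seen, snaps, prefs)
    = ((cs.foldl (fun s c => if c == name || s.contains c then s else s ++ [c]) seen),
       snaps ++ gbuck sw name seen cs,
       prefs ++ gbuck (fun c => !sw c && (q c && r c)) name seen cs) := by
  intro cs
  induction cs with
  | nil => intro seen snaps prefs; simp [gbuck]
  | cons c cs ih =>
    intro seen snaps prefs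
    rw [List.foldl_cons, List.foldl_cons]
    by_cases h0 : c = name
    · have e : stepB name sw q r (seen, snaps, prefs) c = (seen, snaps, prefs) := by
        simp [stepB, h0]
      have f : (if c == name || seen.contains c then seen else seen ++ [c]) = seen := by
        simp [h0]
      have g1 : gbuck sw name seen (c :: cs) = gbuck sw name seen cs := by
        simp only [gbuck]; rw [if_pos]; simp [h0]
      have g2 : gbuck (fun c => !sw c && (q c && r c)) name seen (c :: cs)
          = gbuck (fun c => !sw c && (q c && r c)) name seen cs := by
        simp only [gbuck]; rw [if_pos]; simp [h0]
      rw [e, f, g1, g2]; exact ih seen snaps prefs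
    · by_cases h1 : c ∈ seen
      · have e : stepB name sw q r (seen, snaps, prefs) c = (seen, snaps, prefs) := by
          simp [stepB, PySem.Set.contains, h1]
        have f : (if c == name || seen.contains c then seen else seen ++ [c]) = seen := by
          simp [h1]
        have g1 : gbuck sw name seen (c :: cs) = gbuck sw name seen cs := by
          simp only [gbuck]; rw [if_pos]; simp [h1]
        have g2 : gbuck (fun c => !sw c && (q c && r c)) name seen (c :: cs)
            = gbuck (fun c => !sw c && (q c && r c)) name seen cs := by
          simp only [gbuck]; rw [if_pos]; simp [h1]
        rw [e, f, g1, g2]; exact ih seen snaps prefs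
      · have hadd : PySem.Set.add seen c = seen ++ [c] := by
          simp [PySem.Set.add, PySem.Set.contains, h1]
        have f : (if c == name || seen.contains c then seen else seen ++ [c]) = seen ++ [c] := by
          simp [h0, h1]
        by_cases h2 : sw c = true
        · have e : stepB name sw q r (seen, snaps, prefs) c
              = (seen ++ [c], snaps ++ [c], prefs) := by
            simp [stepB, PySem.Set.contains, PySem.Set.add, h0, h1, h2]
          have g1 : gbuck sw name seen (c :: cs) = c :: gbuck sw name (seen ++ [c]) cs := by
            simp only [gbuck]; rw [if_neg (by simp [h0, h1]), if_pos h2]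
          have g2 : gbuck (fun c => !sw c && (q c && r c)) name seen (c :: cs)
              = gbuck (fun c => !sw c && (q c && r c)) name (seen ++ [c]) cs := by
            simp only [gbuck]; rw [if_neg (by simp [h0, h1]), if_neg (by simp [h2])]
          rw [e, f, g1, g2, ih (seen ++ [c]) (snaps ++ [c]) prefs]
          simp
        · have g1 : gbuck sw name seen (c :: cs) = gbuck sw name (seen ++ [c]) cs := by
            simp only [gbuck]; rw [if_neg (by simp [h0, h1]), if_neg (by simp [h2])]
          by_cases h3 : q c = true
          · by_cases h4 : r c = true
            · have e : stepB name sw q r (seen, snaps, prefs) c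
                  = (seen ++ [c], snaps, prefs ++ [c]) := by
                simp [stepB, PySem.Set.contains, PySem.Set.add, h0, h1, h2, h3, h4]
              have g2 : gbuck (fun c => !sw c && (q c && r c)) name seen (c :: cs)
                  = c :: gbuck (fun c => !sw c && (q c && r c)) name (seen ++ [c]) cs := by
                simp only [gbuck]
                rw [if_neg (by simp [h0, h1]), if_pos (by simp [h2, h3, h4])]
              rw [e, f, g1, g2, ih (seen ++ [c]) snaps (prefs ++ [c])]
              simp
            · have e : stepB name sw q r (seen, snaps, prefs) c
                  = (seen ++ [c], snaps, prefs) := by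
                simp [stepB, PySem.Set.contains, PySem.Set.add, h0, h1, h2, h3, h4]
              have g2 : gbuck (fun c => !sw c && (q c && r c)) name seen (c :: cs)
                  = gbuck (fun c => !sw c && (q c && r c)) name (seen ++ [c]) cs := by
                simp only [gbuck]; rw [if_neg (by simp [h0, h1]), if_neg (by simp [h4])]
              rw [e, f, g1, g2, ih (seen ++ [c]) snaps prefs]
          · have e : stepB name sw q r (seen, snaps, prefs) c
                = (seen ++ [c], snaps, prefs) := by
              simp [stepB, PySem.Set.contains, PySem.Set.add, h0, h1, h2, h3]
            have g2 : gbuck (fun c => !sw c && (q c && r c)) name seen (c :: cs)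
                = gbuck (fun c => !sw c && (q c && r c)) name (seen ++ [c]) cs := by
              simp only [gbuck]; rw [if_neg (by simp [h0, h1]), if_neg (by simp [h3])]
            rw [e, f, g1, g2, ih (seen ++ [c]) snaps prefs]

-- membership in dfilter's output
lemma mem_dfilter (P : String → Bool) : ∀ (cs T : List String) (x : String),
    x ∈ dfilter P T cs ↔ (P x = true ∧ x ∈ cs ∧ x ∉ T) := by
  intro cs
  induction cs with
  | nil => intro T x; simp [dfilter]
  | cons c cs ih =>
    intro T x
    simp only [dfilter]
    by_cases hc : (P c && !T.contains c) = true
    · rw [if_pos hc]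
      simp only [Bool.and_eq_true, Bool.not_eq_true', List.contains_eq_mem,
        decide_eq_false_iff_not] at hc
      constructor
      · intro hx
        rcases List.mem_cons.mp hx with h | h
        · subst h; exact ⟨hc.1, List.mem_cons_self, hc.2⟩
        · rcases (ih _ _).mp h with ⟨hp, hin, hnt⟩
          exact ⟨hp, List.mem_cons_of_mem _ hin, fun hT => hnt (List.mem_append_left _ hT)⟩
      · rintro ⟨hp, hin, hnt⟩
        by_cases hxc : x = c
        · subst hxc; exact List.mem_cons_self
        · apply List.mem_cons_of_mem
          apply (ih _ _).mpr
          refine ⟨hp, ?_, ?_⟩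
          · rcases List.mem_cons.mp hin with h | h
            · exact absurd h hxc
            · exact h
          · intro hT
            rcases List.mem_append.mp hT with h | h
            · exact hnt h
            · exact hxc (List.mem_singleton.mp h)
    · rw [if_neg hc]
      rw [ih]
      constructor
      · rintro ⟨hp, hin, hnt⟩; exact ⟨hp, List.mem_cons_of_mem _ hin, hnt⟩
      · rintro ⟨hp, hin, hnt⟩
        refine ⟨hp, ?_, hnt⟩
        rcases List.mem_cons.mp hin with h | h
        · exfalso
          subst h
          apply hc
          simp only [Bool.and_eq_true, Bool.not_eq_true', List.contains_eq_mem,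
            decide_eq_false_iff_not]
          exact ⟨hp, hnt⟩
        · exact h

-- bridge: dfilter with one seen list equals gbuck with another whenever the
-- effective per-element conditions agree on every element of cs
lemma dfilter_eq_gbuck (P Q : String → Bool) (name : String) : ∀ (cs T seen : List String),
    (∀ c ∈ cs, (P c && !T.contains c) = (!(c == name) && !seen.contains c && Q c)) →
    dfilter P T cs = gbuck Q name seen cs := by
  intro cs
  induction cs with
  | nil => intro T seen _; simp [dfilter, gbuck]
  | cons c cs ih =>
    intro T seen H
    have Hc := H c List.mem_cons_self
    have Htl : ∀ d ∈ cs, (P d && !T.contains d) = (!(d == name) && !seen.contains d && Q d) :=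
      fun d hd => H d (List.mem_cons_of_mem _ hd)
    simp only [dfilter, gbuck]
    rw [Hc]
    by_cases h0 : c = name
    · rw [if_neg (by simp [h0]), if_pos (by simp [h0])]
      exact ih _ _ Htl
    · by_cases h1 : c ∈ seen
      · rw [if_neg (by simp [h1]), if_pos (by simp [h1])]
        exact ih _ _ Htl
      · by_cases hq : Q c = true
        · rw [if_pos (by simp [h0, h1, hq]), if_neg (by simp [h0, h1]), if_pos hq]
          congr 1
          apply ih
          intro d hd
          by_cases hdc : d = c
          · subst hdc; simp
          · have e1 : (T ++ [c]).contains d = T.contains d := by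
              simp [List.contains_eq_mem, hdc]
            have e2 : (seen ++ [c]).contains d = seen.contains d := by
              simp [List.contains_eq_mem, hdc]
            rw [e1, e2]
            exact Htl d hd
        · rw [if_neg (by simp [hq]), if_neg (by simp [h0, h1]), if_neg (by simp [hq])]
          apply ih
          intro d hd
          by_cases hdc : d = c
          · subst hdc
            rw [Hc]
            simp [hq]
          · have e2 : (seen ++ [c]).contains d = seen.contains d := by
              simp [List.contains_eq_mem, hdc]
            rw [e2]
            exact Htl d hd

-- m0 never contains a non-name string
lemma m0_not_contains (name : String) (candidates : List String) (c : String) (h : c ≠ name) :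
    (if candidates.contains name then [name] else []).contains c = false := by
  split <;> simp [h]

-- ===== VERDICT (by name: the statement is the Claim_ definition above) =====
theorem fuzzy_match_all_spec : Claim_equal_fuzzy_match_all := by
  intro name candidates _
  unfold Spec_fuzzy_match_all
  show fuzzy_match_all name candidates = fuzzy_match_all_alt name candidates
  show (candidates.foldl
          (stepA2 name (fun c => PySem.Str.isIn "_snap" c) (fun c => pvPrefCond name c))
          (candidates.foldl
            (stepA1 name (fun c => PySem.Str.startswith c (name ++ "_snap")))
            (if candidates.contains name then [name] else [])))
      = ((if candidates.contains name then [name] else []) ++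
          (candidates.foldl
            (stepB name (fun c => PySem.Str.startswith c (name ++ "_snap"))
              (fun c => PySem.Str.isIn "_snap" c) (fun c => pvPrefCond name c))
            (PySem.Set.empty, [], [])).2.1 ++
          (candidates.foldl
            (stepB name (fun c => PySem.Str.startswith c (name ++ "_snap"))
              (fun c => PySem.Str.isIn "_snap" c) (fun c => pvPrefCond name c))
            (PySem.Set.empty, [], [])).2.2)
  rw [loopA2_eq, loopA1_eq, loopB_eq]
  have E1 : dfilter (fun c => !(c == name) && PySem.Str.startswith c (name ++ "_snap"))
        (if candidates.contains name then [name] else []) candidates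
      = gbuck (fun c => PySem.Str.startswith c (name ++ "_snap")) name [] candidates := by
    apply dfilter_eq_gbuck
    intro c _
    by_cases h : c = name
    · simp [h]
    · rw [m0_not_contains name candidates c h]
      simp
  have hm1 : ∀ c ∈ candidates, c ≠ name →
      ((if candidates.contains name then [name] else []) ++
        gbuck (fun c => PySem.Str.startswith c (name ++ "_snap")) name [] candidates).contains c
      = PySem.Str.startswith c (name ++ "_snap") := by
    intro c hc h
    rw [← E1]
    have hmem : c ∈ (if candidates.contains name then [name] else []) ++
        dfilter (fun c => !(c == name) && PySem.Str.startswith c (name ++ "_snap"))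
          (if candidates.contains name then [name] else []) candidates
        ↔ PySem.Str.startswith c (name ++ "_snap") = true := by
      rw [List.mem_append, mem_dfilter]
      constructor
      · rintro (hin | ⟨hp, _, _⟩)
        · exfalso; revert hin; split <;> simp [h]
        · simpa [h] using hp
      · intro hsw
        right
        refine ⟨by rw [hsw]; simp [h], hc, ?_⟩
        intro hin; revert hin; split <;> simp [h]
    cases hsw : PySem.Str.startswith c (name ++ "_snap") with
    | true =>
        simpa using hmem.mpr hsw
    | false =>
        have hnin : c ∉ (if candidates.contains name then [name] else []) ++
            dfilter (fun c => !(c == name) && PySem.Str.startswith c (name ++ "_snap"))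
              (if candidates.contains name then [name] else []) candidates := by
          intro hin
          have := hmem.mp hin
          rw [hsw] at this
          exact Bool.false_ne_true this
        simpa using hnin
  have E2 : dfilter (fun c => !(c == name) && (PySem.Str.isIn "_snap" c && pvPrefCond name c))
        ((if candidates.contains name then [name] else []) ++
          dfilter (fun c => !(c == name) && PySem.Str.startswith c (name ++ "_snap"))
            (if candidates.contains name then [name] else []) candidates) candidates
      = gbuck (fun c => !PySem.Str.startswith c (name ++ "_snap")
            && (PySem.Str.isIn "_snap" c && pvPrefCond name c)) name [] candidates := by
    apply dfilter_eq_gbuck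
    intro c hc
    by_cases h : c = name
    · simp [h]
    · rw [E1, hm1 c hc h]
      generalize PySem.Str.startswith c (name ++ "_snap") = b1
      generalize PySem.Str.isIn "_snap" c = b2
      generalize pvPrefCond name c = b3
      cases b1 <;> cases b2 <;> cases b3 <;> simp
  rw [E1] at E2
  rw [E1, E2]
  simp [List.append_assoc]
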